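-- pv_equiv track=rewrite | github.com/Puriney/MrY | MrY/list_avail.py | tag_installed
-- ===== SOURCE A (Python) =====
-- from collections import defaultdict, OrderedDict
--
-- def tag_installed(filelist=[]):
--     tag = OrderedDict({'Genome (.fa)': False,
--                        # 'Genome(.fa.gz)': True,
--                        'Annotation (.gtf)': False, 'Annotation (.gff3)': False,
--                        'Bowtie2': False, 'STAR': False})
--     for f in filelist:
--         if f.endswith('.fa'):
--             tag['Genome (.fa)'] = True
--         # elif f.endswith('.fa.gz'):
--         #     tag['Genome(.fa.gz)'] = True
--         elif f.endswith('.gtf'):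
--             tag['Annotation (.gtf)'] = True
--         elif f.endswith('.gff3'):
--             tag['Annotation (.gff3)'] = True
--         elif f.endswith('.bt2'):
--             tag['Bowtie2'] = True
--         elif f.endswith('SA'):
--             tag['STAR'] = True
--         else:
--             continue
--     return(tag)
-- ===== SOURCE B (Python) =====
-- from collections import OrderedDict
--
-- def tag_installed(filelist=[]):
--     categories = [('Genome (.fa)', '.fa'),
--                   ('Annotation (.gtf)', '.gtf'),
--                   ('Annotation (.gff3)', '.gff3'),
--                   ('Bowtie2', '.bt2'),
--                   ('STAR', 'SA')]
--     return OrderedDict((name, any(f.endswith(suffix) for f in filelist))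
--                        for name, suffix in categories)
-- ===== Notes on version B (the rewrite author's own statement) =====
-- stated objective: simpler
-- what changed: A makes one pass over the files with a five-way if/elif chain mutating a dict; B loops over a category->suffix table and computes each flag as any(f.endswith(suffix)), valid because no two suffixes can end the same string.
import Mathlib
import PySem

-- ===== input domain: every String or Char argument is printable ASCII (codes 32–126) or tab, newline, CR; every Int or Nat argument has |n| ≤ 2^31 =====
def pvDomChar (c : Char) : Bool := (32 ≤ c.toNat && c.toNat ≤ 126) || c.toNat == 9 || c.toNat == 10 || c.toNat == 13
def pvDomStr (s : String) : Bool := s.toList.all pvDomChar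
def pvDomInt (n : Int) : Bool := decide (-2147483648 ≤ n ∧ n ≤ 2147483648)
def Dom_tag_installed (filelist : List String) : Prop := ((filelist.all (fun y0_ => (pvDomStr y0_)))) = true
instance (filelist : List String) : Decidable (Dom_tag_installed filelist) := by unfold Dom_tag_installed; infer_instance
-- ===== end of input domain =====

-- B replaces A's single file pass with an if/elif chain mutating a dict by a loop over a
-- category->suffix table computing each flag with any(endswith); objective: simpler.

-- ===== PORT A =====
-- the OrderedDict literal with the five keys, all False
def tagInit : PySem.Dict String Bool :=
  ((((PySem.Dict.empty.insert "Genome (.fa)" false).insert "Annotation (.gtf)" false).insert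
      "Annotation (.gff3)" false).insert "Bowtie2" false).insert "STAR" false

def tagStep (tag : PySem.Dict String Bool) (f : String) : PySem.Dict String Bool :=
  if PySem.Str.endswith f ".fa" then tag.insert "Genome (.fa)" true
  else if PySem.Str.endswith f ".gtf" then tag.insert "Annotation (.gtf)" true
  else if PySem.Str.endswith f ".gff3" then tag.insert "Annotation (.gff3)" true
  else if PySem.Str.endswith f ".bt2" then tag.insert "Bowtie2" true
  else if PySem.Str.endswith f "SA" then tag.insert "STAR" true
  else tag  -- 'continue'

def tag_installed (filelist : List String) : List (String × Bool) :=
  (filelist.foldl tagStep tagInit).items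

-- ===== PORT B =====
def categories : List (String × String) :=
  [("Genome (.fa)", ".fa"), ("Annotation (.gtf)", ".gtf"), ("Annotation (.gff3)", ".gff3"),
   ("Bowtie2", ".bt2"), ("STAR", "SA")]

def tag_installed_alt (filelist : List String) : List (String × Bool) :=
  categories.map (fun p => (p.1, filelist.any (fun f => PySem.Str.endswith f p.2)))

-- ===== PRECONDITION & SPEC =====
def Spec_tag_installed (filelist : List String) (out : List (String × Bool)) : Prop := out = tag_installed_alt filelist
instance (filelist : List String) (out : List (String × Bool)) : Decidable (Spec_tag_installed filelist out) := by unfold Spec_tag_installed; infer_instance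

-- ===== CLAIM (what is proved, stated in full; the proofs are below) =====
def Claim_equal_tag_installed : Prop := ∀ (filelist : List String), Dom_tag_installed filelist → Spec_tag_installed filelist (tag_installed filelist)

-- ===== LEMMAS AND PROOFS =====

-- two suffixes of the same string are comparable as suffixes of each other
theorem pv_suffix_comparable {p q s : List Char} (hp : p <:+ s) (hq : q <:+ s) :
    p <:+ q ∨ q <:+ p := by
  have := List.prefix_or_prefix_of_prefix
      (List.reverse_prefix.mpr hp) (List.reverse_prefix.mpr hq)
  rcases this with h | h
  · exact Or.inl (List.reverse_prefix.mp h)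
  · exact Or.inr (List.reverse_prefix.mp h)

-- no string ends with two of the five (pairwise non-nested) suffixes
theorem pv_ends_disjoint (p q : String) (hpq : ¬ p.toList <:+ q.toList)
    (hqp : ¬ q.toList <:+ p.toList)
    (f : String) (h : PySem.Str.endswith f q = true) :
    PySem.Str.endswith f p = false := by
  by_contra hcon
  rw [Bool.not_eq_false] at hcon
  simp at h hcon
  have hq := (PySem.Chars.endswith_iff _ _).mp h
  have hp := (PySem.Chars.endswith_iff _ _).mp hcon
  rcases pv_suffix_comparable hp hq with h' | h'
  · exact hpq h'
  · exact hqp h'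

-- contrapositive helper for boolean flags
theorem pv_contra {a b : Bool} (h : a = true → b = false) (hb : b = true) : a = false := by
  cases a
  · rfl
  · rw [h rfl] at hb; exact absurd hb (by decide)

def e1 (f : String) : Bool := PySem.Str.endswith f ".fa"
def e2 (f : String) : Bool := PySem.Str.endswith f ".gtf"
def e3 (f : String) : Bool := PySem.Str.endswith f ".gff3"
def e4 (f : String) : Bool := PySem.Str.endswith f ".bt2"
def e5 (f : String) : Bool := PySem.Str.endswith f "SA"

-- one step of A's loop, on the always-five-key dict, ORs each flag with its suffix test
theorem pv_step_eq (f : String) (b1 b2 b3 b4 b5 : Bool) :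
    tagStep (PySem.Dict.mk [("Genome (.fa)", b1), ("Annotation (.gtf)", b2),
      ("Annotation (.gff3)", b3), ("Bowtie2", b4), ("STAR", b5)]) f =
    PySem.Dict.mk [("Genome (.fa)", b1 || e1 f), ("Annotation (.gtf)", b2 || e2 f),
      ("Annotation (.gff3)", b3 || e3 f), ("Bowtie2", b4 || e4 f), ("STAR", b5 || e5 f)] := by
  have d21 := pv_ends_disjoint ".fa" ".gtf" (by decide) (by decide) f
  have d31 := pv_ends_disjoint ".fa" ".gff3" (by decide) (by decide) f
  have d32 := pv_ends_disjoint ".gtf" ".gff3" (by decide) (by decide) f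
  have d41 := pv_ends_disjoint ".fa" ".bt2" (by decide) (by decide) f
  have d42 := pv_ends_disjoint ".gtf" ".bt2" (by decide) (by decide) f
  have d43 := pv_ends_disjoint ".gff3" ".bt2" (by decide) (by decide) f
  have d51 := pv_ends_disjoint ".fa" "SA" (by decide) (by decide) f
  have d52 := pv_ends_disjoint ".gtf" "SA" (by decide) (by decide) f
  have d53 := pv_ends_disjoint ".gff3" "SA" (by decide) (by decide) f
  have d54 := pv_ends_disjoint ".bt2" "SA" (by decide) (by decide) f
  unfold tagStep e1 e2 e3 e4 e5
  split_ifs with h1 h2 h3 h4 h5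
  · have n2 := pv_contra d21 h1
    have n3 := pv_contra d31 h1
    have n4 := pv_contra d41 h1
    have n5 := pv_contra d51 h1
    simp at h1 n2 n3 n4 n5
    simp [PySem.Dict.insert, PySem.Dict.contains, h1, n2, n3, n4, n5]
  · have n3 := pv_contra d32 h2
    have n4 := pv_contra d42 h2
    have n5 := pv_contra d52 h2
    simp at h1 h2 n3 n4 n5
    simp [PySem.Dict.insert, PySem.Dict.contains, h1, h2, n3, n4, n5]
  · have n4 := pv_contra d43 h3
    have n5 := pv_contra d53 h3
    simp at h1 h2 h3 n4 n5
    simp [PySem.Dict.insert, PySem.Dict.contains, h1, h2, h3, n4, n5]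
  · have n5 := pv_contra d54 h4
    simp at h1 h2 h3 h4 n5
    simp [PySem.Dict.insert, PySem.Dict.contains, h1, h2, h3, h4, n5]
  · simp at h1 h2 h3 h4 h5
    simp [PySem.Dict.insert, PySem.Dict.contains, h1, h2, h3, h4, h5]
  · simp at h1 h2 h3 h4 h5
    simp [h1, h2, h3, h4, h5]

theorem pv_loop_eq (fs : List String) (b1 b2 b3 b4 b5 : Bool) :
    fs.foldl tagStep (PySem.Dict.mk [("Genome (.fa)", b1), ("Annotation (.gtf)", b2),
      ("Annotation (.gff3)", b3), ("Bowtie2", b4), ("STAR", b5)]) =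
    PySem.Dict.mk [("Genome (.fa)", b1 || fs.any e1), ("Annotation (.gtf)", b2 || fs.any e2),
      ("Annotation (.gff3)", b3 || fs.any e3), ("Bowtie2", b4 || fs.any e4),
      ("STAR", b5 || fs.any e5)] := by
  induction fs generalizing b1 b2 b3 b4 b5 with
  | nil => simp
  | cons f fs ih =>
      rw [List.foldl_cons, pv_step_eq, ih]
      simp [Bool.or_assoc]

-- ===== VERDICT (by name: the statement is the Claim_ definition above) =====
theorem tag_installed_spec : Claim_equal_tag_installed := by
  intro filelist _
  show tag_installed filelist = tag_installed_alt filelist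
  unfold tag_installed tag_installed_alt categories
  have : tagInit = PySem.Dict.mk [("Genome (.fa)", false), ("Annotation (.gtf)", false),
      ("Annotation (.gff3)", false), ("Bowtie2", false), ("STAR", false)] := by decide
  rw [this, pv_loop_eq]
  rfl
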